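-- pv_equiv track=rewrite | github.com/Anonymous-12-05/DSA-Qs | prepping/string stack.py | max_symmetric_substring_length
-- ===== SOURCE A (Python) =====
-- def max_symmetric_substring_length(S):
--     n = len(S)
--     max_len = 0
--     for i in range(n):
--         for j in range(i+1, n+1):
--             substring = S[i:j]
--             if len(substring) % 2 == 0:
--                 left_half = substring[:len(substring)//2]
--                 right_half = substring[len(substring)//2:]
--                 if '?' in left_half:
--                     left_half = left_half.replace('?', '<')
--                 if '?' in right_half:
--                     right_half = right_half.replace('?', '>')
--                 if left_half.count('<') == len(left_half) and right_half.count('>') == len(right_half):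
--                     max_len = max(max_len, len(substring))
--     return max_len
-- ===== SOURCE B (Python) =====
-- def max_symmetric_substring_length(S):
--     # O(n): run lengths of '<'/'?' ending at each boundary and of '>'/'?' starting there;
--     # best even substring centered at a boundary is twice the smaller run.
--     left = [0]
--     for c in S:
--         left.append(left[-1] + 1 if c in '<?' else 0)
--     right = [0]
--     for c in reversed(S):
--         right.append(right[-1] + 1 if c in '>?' else 0)
--     right.reverse()
--     best = 0
--     for l, r in zip(left, right):
--         best = max(best, 2 * min(l, r))
--     return best
-- ===== Notes on version B (the rewrite author's own statement) =====
-- stated objective: faster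
-- what changed: A enumerates all O(n^2) substrings and rescans each of them (O(n^3) total); B makes one linear pass computing, for every boundary position, the length of the run of left-half-compatible characters ending there and of right-half-compatible characters starting there, and returns twice the largest min of the two runs.
import Mathlib
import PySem

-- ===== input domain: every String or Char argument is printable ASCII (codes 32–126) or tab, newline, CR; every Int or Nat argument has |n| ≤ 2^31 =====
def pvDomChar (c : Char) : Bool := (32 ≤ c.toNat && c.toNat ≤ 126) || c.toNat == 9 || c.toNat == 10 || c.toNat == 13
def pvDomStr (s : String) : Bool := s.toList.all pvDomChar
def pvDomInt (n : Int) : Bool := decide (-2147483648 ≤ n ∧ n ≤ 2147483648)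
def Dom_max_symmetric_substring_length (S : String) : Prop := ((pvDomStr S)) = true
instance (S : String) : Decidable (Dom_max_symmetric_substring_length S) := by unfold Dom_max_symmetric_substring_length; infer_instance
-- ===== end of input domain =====

-- B replaces A's O(n^3) scan of all even substrings by one O(n) pass over boundary
-- positions using run lengths of '<'/'?' to the left and '>'/'?' to the right.

-- ===== PORT A =====
def max_symmetric_substring_length (S : String) : Int :=
  let n : Int := PySem.Str.len S
  (PySem.List.pyRange 0 n 1).foldl (fun maxLen i =>
    (PySem.List.pyRange (i + 1) (n + 1) 1).foldl (fun maxLen j =>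
      let substring := PySem.Str.slice S (some i) (some j)
      if PySem.Int.mod (PySem.Str.len substring) 2 = 0 then
        let leftHalf := PySem.Str.slice substring none (some (PySem.Int.floordiv (PySem.Str.len substring) 2))
        let rightHalf := PySem.Str.slice substring (some (PySem.Int.floordiv (PySem.Str.len substring) 2)) none
        let leftHalf := if PySem.Str.isIn "?" leftHalf then PySem.Str.replace leftHalf "?" "<" else leftHalf
        let rightHalf := if PySem.Str.isIn "?" rightHalf then PySem.Str.replace rightHalf "?" ">" else rightHalf
        if (PySem.Str.count leftHalf "<" : Int) = PySem.Str.len leftHalf ∧ (PySem.Str.count rightHalf ">" : Int) = PySem.Str.len rightHalf then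
          max maxLen (PySem.Str.len substring)
        else maxLen
      else maxLen) maxLen) 0

-- ===== PORT B =====
def max_symmetric_substring_length_alt (S : String) : Int :=
  let left := S.toList.foldl (fun (st : List Int × Int) c =>
      let a := if c = '<' ∨ c = '?' then st.2 + 1 else 0
      (st.1 ++ [a], a)) ([0], 0)
  let right := S.toList.reverse.foldl (fun (st : List Int × Int) c =>
      let a := if c = '>' ∨ c = '?' then st.2 + 1 else 0
      (st.1 ++ [a], a)) ([0], 0)
  (left.1.zip right.1.reverse).foldl (fun best p => max best (2 * min p.1 p.2)) 0

-- ===== PRECONDITION & SPEC =====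
def Spec_max_symmetric_substring_length (S : String) (out : Int) : Prop := out = max_symmetric_substring_length_alt S
instance (S : String) (out : Int) : Decidable (Spec_max_symmetric_substring_length S out) := by unfold Spec_max_symmetric_substring_length; infer_instance

-- ===== CLAIM (what is proved, stated in full; the proofs are below) =====
def Claim_equal_max_symmetric_substring_length : Prop := ∀ (S : String), Dom_max_symmetric_substring_length S → Spec_max_symmetric_substring_length S (max_symmetric_substring_length S)

-- ===== LEMMAS AND PROOFS =====

-- run-length lists (proof-side mirror of B's two accumulation loops)
def runsN (p : Char → Bool) : List Char → Int → List Int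
  | [], _ => []
  | c :: t, a => (if p c then a + 1 else 0) :: runsN p t (if p c then a + 1 else 0)

def runsLast (p : Char → Bool) : List Char → Int → Int
  | [], a => a
  | c :: t, a => runsLast p t (if p c then a + 1 else 0)

-- closed recursion for the boundary run values
def lbF (p : Char → Bool) (cs : List Char) : Nat → Int
  | 0 => 0
  | m + 1 => if p (cs.getD m ' ') then lbF p cs m + 1 else 0

def pL (c : Char) : Bool := decide (c = '<' ∨ c = '?')
def pR (c : Char) : Bool := decide (c = '>' ∨ c = '?')

def rbF (cs : List Char) (m : Nat) : Int := lbF pR cs.reverse (cs.length - m)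

def bigmax (l : List Int) : Int := l.foldr max 0

-- A's inner-loop contribution for the pair (i, j) (proof-side mirror of A's body)
def valA (S : String) (i j : Int) : Int :=
  let substring := PySem.Str.slice S (some i) (some j)
  if PySem.Int.mod (PySem.Str.len substring) 2 = 0 then
    let leftHalf := PySem.Str.slice substring none (some (PySem.Int.floordiv (PySem.Str.len substring) 2))
    let rightHalf := PySem.Str.slice substring (some (PySem.Int.floordiv (PySem.Str.len substring) 2)) none
    let leftHalf := if PySem.Str.isIn "?" leftHalf then PySem.Str.replace leftHalf "?" "<" else leftHalf
    let rightHalf := if PySem.Str.isIn "?" rightHalf then PySem.Str.replace rightHalf "?" ">" else rightHalf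
    if (PySem.Str.count leftHalf "<" : Int) = PySem.Str.len leftHalf ∧ (PySem.Str.count rightHalf ">" : Int) = PySem.Str.len rightHalf then
      PySem.Str.len substring
    else 0
  else 0

lemma bigmax_nonneg (l : List Int) : 0 ≤ bigmax l := by
  induction l with
  | nil => simp [bigmax]
  | cons x t ih => simp only [bigmax, List.foldr] at *; omega

lemma le_bigmax {l : List Int} {x : Int} (h : x ∈ l) : x ≤ bigmax l := by
  induction l with
  | nil => simp at h
  | cons y t ih =>
    simp only [bigmax, List.foldr] at *
    rcases List.mem_cons.1 h with h | h
    · omega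
    · have := ih h; omega

lemma bigmax_le {l : List Int} {c : Int} (hc : 0 ≤ c) (h : ∀ x ∈ l, x ≤ c) : bigmax l ≤ c := by
  induction l with
  | nil => simpa [bigmax]
  | cons y t ih =>
    simp only [bigmax, List.foldr] at *
    have h1 := h y (by simp)
    have h2 := ih (fun x hx => h x (by simp [hx]))
    omega

lemma foldl_step_max {α : Type} (l : List α) (step : Int → α → Int) (v : α → Int)
    (hs : ∀ a x, x ∈ l → 0 ≤ a → step a x = max a (v x)) :
    ∀ a, 0 ≤ a → l.foldl step a = max a (bigmax (l.map v)) := by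
  induction l with
  | nil => intro a ha; simp [bigmax]; omega
  | cons x t ih =>
    intro a ha
    have hb := bigmax_nonneg (t.map v)
    simp only [List.foldl, List.map, bigmax, List.foldr]
    rw [hs a x (by simp) ha,
      ih (fun a x hx ha => hs a x (by simp [hx]) ha) (max a (v x)) (by omega)]
    simp only [bigmax]
    omega

lemma runsN_length (p : Char → Bool) : ∀ (cs : List Char) (a : Int), (runsN p cs a).length = cs.length := by
  intro cs; induction cs with
  | nil => intro a; simp [runsN]
  | cons c t ih => intro a; simp [runsN, ih]

lemma foldl_runs (P : Char → Prop) [DecidablePred P] (cs : List Char) : ∀ (l0 : List Int) (a0 : Int),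
    cs.foldl (fun (st : List Int × Int) c =>
      let a := if P c then st.2 + 1 else 0
      (st.1 ++ [a], a)) (l0, a0)
    = (l0 ++ runsN (fun c => decide (P c)) cs a0, runsLast (fun c => decide (P c)) cs a0) := by
  induction cs with
  | nil => intro l0 a0; simp [runsN, runsLast]
  | cons c t ih =>
    intro l0 a0
    simp only [List.foldl, runsN, runsLast]
    rw [ih]
    by_cases h : P c <;> simp [h]

lemma runs_getD (p : Char → Bool) : ∀ (cs : List Char) (a0 : Int) (m : Nat), m < cs.length →
    (a0 :: runsN p cs a0).getD (m + 1) 0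
      = if p (cs.getD m ' ') then (a0 :: runsN p cs a0).getD m 0 + 1 else 0 := by
  intro cs
  induction cs with
  | nil => intro a0 m h; simp at h
  | cons c t ih =>
    intro a0 m h
    cases m with
    | zero => simp [runsN]
    | succ m =>
      have := ih (if p c then a0 + 1 else 0) m (by simpa using h)
      simpa [runsN] using this

lemma lb_eq (p : Char → Bool) (cs : List Char) : ∀ (m : Nat), m ≤ cs.length →
    (0 :: runsN p cs 0).getD m 0 = lbF p cs m := by
  intro m
  induction m with
  | zero => intro _; rfl
  | succ m ih =>
    intro h
    rw [runs_getD p cs 0 m (by omega), ih (by omega)]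
    rfl

lemma lbF_nonneg (p : Char → Bool) (cs : List Char) : ∀ m, 0 ≤ lbF p cs m := by
  intro m
  induction m with
  | zero => simp [lbF]
  | succ m ih => simp only [lbF]; split <;> omega

-- L1 : a run value bounds a block of good characters to the left
lemma lb_block (p : Char → Bool) (cs : List Char) : ∀ (k m : Nat), (k : Int) ≤ lbF p cs m →
    k ≤ m ∧ ∀ t, m - k ≤ t → t < m → p (cs.getD t ' ') = true := by
  intro k
  induction k with
  | zero => intro m _; exact ⟨Nat.zero_le _, fun t h1 h2 => absurd h2 (by omega)⟩
  | succ k ih =>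
    intro m hm
    cases m with
    | zero => simp [lbF] at hm; omega
    | succ m =>
      simp only [lbF] at hm
      by_cases hp : p (cs.getD m ' ') = true
      · rw [if_pos hp] at hm
        obtain ⟨hk, hall⟩ := ih m (by omega)
        refine ⟨by omega, fun t h1 h2 => ?_⟩
        by_cases ht : t = m
        · subst ht; exact hp
        · exact hall t (by omega) (by omega)
      · rw [if_neg hp] at hm; omega

-- L2 : a block of good characters to the left forces the run value
lemma lb_of_block (p : Char → Bool) (cs : List Char) : ∀ (k m : Nat), k ≤ m →
    (∀ t, m - k ≤ t → t < m → p (cs.getD t ' ') = true) → (k : Int) ≤ lbF p cs m := by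
  intro k
  induction k with
  | zero => intro m _ _; exact_mod_cast lbF_nonneg p cs m
  | succ k ih =>
    intro m hk hall
    cases m with
    | zero => omega
    | succ m =>
      have hp : p (cs.getD m ' ') = true := hall m (by omega) (by omega)
      have := ih m (by omega) (fun t h1 h2 => hall t (by omega) (by omega))
      simp only [lbF, if_pos hp]
      push_cast
      omega

lemma rbF_nonneg (cs : List Char) (m : Nat) : 0 ≤ rbF cs m := lbF_nonneg _ _ _

lemma rbF_zero_at_end (cs : List Char) : rbF cs cs.length = 0 := by
  simp [rbF, lbF]

lemma rbF_succ (cs : List Char) (m : Nat) (h : m < cs.length) :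
    rbF cs m = if pR (cs.getD m ' ') then rbF cs (m + 1) + 1 else 0 := by
  have h1 : cs.length - m = (cs.length - (m + 1)) + 1 := by omega
  have h2 : cs.reverse.getD (cs.length - (m + 1)) ' ' = cs.getD m ' ' := by
    have hlt : cs.length - (m + 1) < cs.reverse.length := by simp; omega
    have hm : m < cs.length := h
    rw [List.getD_eq_getElem _ _ hlt, List.getD_eq_getElem _ _ hm, List.getElem_reverse]
    congr 1
    omega
  rw [rbF, h1]
  simp only [lbF, h2]
  rfl

-- R1 : the right-run value bounds a block of good characters to the right
lemma rb_block (cs : List Char) : ∀ (k m : Nat), m ≤ cs.length → (k : Int) ≤ rbF cs m →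
    m + k ≤ cs.length ∧ ∀ t, m ≤ t → t < m + k → pR (cs.getD t ' ') = true := by
  intro k
  induction k with
  | zero => intro m hm _; exact ⟨by omega, fun t h1 h2 => absurd h2 (by omega)⟩
  | succ k ih =>
    intro m hm hk
    by_cases h : m < cs.length
    · rw [rbF_succ cs m h] at hk
      by_cases hp : pR (cs.getD m ' ') = true
      · rw [if_pos hp] at hk
        obtain ⟨h1, h2⟩ := ih (m + 1) (by omega) (by omega)
        refine ⟨by omega, fun t ht1 ht2 => ?_⟩
        by_cases ht : t = m
        · subst ht; exact hp
        · exact h2 t (by omega) (by omega)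
      · rw [if_neg hp] at hk; omega
    · have : m = cs.length := by omega
      subst this
      rw [rbF_zero_at_end] at hk
      omega

-- R2 : a block of good characters to the right forces the right-run value
lemma rb_of_block (cs : List Char) : ∀ (k m : Nat), m + k ≤ cs.length →
    (∀ t, m ≤ t → t < m + k → pR (cs.getD t ' ') = true) → (k : Int) ≤ rbF cs m := by
  intro k
  induction k with
  | zero => intro m _ _; exact rbF_nonneg cs m
  | succ k ih =>
    intro m hm hall
    have hp : pR (cs.getD m ' ') = true := hall m (by omega) (by omega)
    have := ih (m + 1) (by omega) (fun t h1 h2 => hall t (by omega) (by omega))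
    rw [rbF_succ cs m (by omega), if_pos hp]
    push_cast
    omega

-- single-character replace is map
lemma replace_go_single (q d : Char) : ∀ (fuel : Nat) (l acc : List Char), l.length ≤ fuel →
    PySem.Chars.replace.go [q] [d] fuel l acc
      = acc.reverse ++ l.map (fun c => if c = q then d else c) := by
  intro fuel
  induction fuel with
  | zero =>
    intro l acc h
    have hl : l = [] := by cases l <;> simp_all
    subst hl
    simp [PySem.Chars.replace.go]
  | succ fuel ih =>
    intro l acc h
    cases l with
    | nil => simp [PySem.Chars.replace.go]
    | cons c t =>
      simp only [PySem.Chars.replace.go]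
      by_cases hc : c = q
      · have hpre : [q].isPrefixOf (c :: t) = true := by simp [List.isPrefixOf, hc]
        rw [if_pos hpre]
        simp only [List.length_cons] at h
        rw [ih _ _ (by simpa using h)]
        simp [hc]
      · have hpre : [q].isPrefixOf (c :: t) = false := by
          simp [List.isPrefixOf]
          exact fun hh => hc hh.symm
        rw [hpre]
        simp only [Bool.false_eq_true, if_false]
        rw [ih _ _ (by simpa using h)]
        simp [hc]

lemma replace_single (q d : Char) (l : List Char) :
    PySem.Chars.replace l [q] [d] = l.map (fun c => if c = q then d else c) := by
  simp only [PySem.Chars.replace, List.isEmpty_cons, Bool.false_eq_true, if_false]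
  simpa using replace_go_single q d l.length l [] le_rfl

-- single-character count is List.count
lemma count_go_single (q : Char) : ∀ (fuel : Nat) (l : List Char) (acc : Nat), l.length ≤ fuel →
    PySem.Chars.count.go [q] fuel l acc = acc + l.count q := by
  intro fuel
  induction fuel with
  | zero =>
    intro l acc h
    have hl : l = [] := by cases l <;> simp_all
    subst hl
    simp [PySem.Chars.count.go]
  | succ fuel ih =>
    intro l acc h
    cases l with
    | nil => simp [PySem.Chars.count.go]
    | cons c t =>
      simp only [PySem.Chars.count.go]
      by_cases hc : c = q
      · have hpre : [q].isPrefixOf (c :: t) = true := by simp [List.isPrefixOf, hc]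
        rw [if_pos hpre]
        simp only [List.length_cons] at h
        rw [ih _ _ (by simpa using h)]
        simp [hc, List.count_cons]
        omega
      · have hpre : [q].isPrefixOf (c :: t) = false := by
          simp [List.isPrefixOf]
          exact fun hh => hc hh.symm
        rw [hpre]
        simp only [Bool.false_eq_true, if_false]
        rw [ih _ _ (by simpa using h)]
        simp [List.count_cons, hc]

lemma count_single (q : Char) (l : List Char) : PySem.Chars.count l [q] = l.count q := by
  simp only [PySem.Chars.count, List.isEmpty_cons, Bool.false_eq_true, if_false]
  simpa using count_go_single q l.length l 0 le_rfl

lemma isIn_singleton (q : Char) (l : List Char) :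
    PySem.Chars.isIn [q] l = true ↔ q ∈ l := by
  rw [PySem.Chars.isIn_iff_infix]
  constructor
  · intro h; exact h.sublist.subset (by simp)
  · intro h
    obtain ⟨s, t, rfl⟩ := List.append_of_mem h
    exact ⟨s, t, by simp⟩

-- the conditional replace-then-count test of A says: every character is d or '?'
lemma half_test (d : Char) (l : List Char) :
    ((if PySem.Chars.isIn ['?'] l = true then PySem.Chars.replace l ['?'] [d] else l).count d
      = (if PySem.Chars.isIn ['?'] l = true then PySem.Chars.replace l ['?'] [d] else l).length)
    ↔ ∀ x ∈ l, x = d ∨ x = '?' := by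
  by_cases h : '?' ∈ l
  · rw [if_pos ((isIn_singleton '?' l).2 h), replace_single]
    rw [List.length_map, show (l.map (fun c => if c = '?' then d else c)).count d
        = (l.map (fun c => if c = '?' then d else c)).count d from rfl]
    have hlen : (l.map (fun c => if c = '?' then d else c)).length = l.length := by simp
    rw [← hlen, List.count_eq_length]
    constructor
    · intro hall x hx
      have := hall _ (List.mem_map.2 ⟨x, hx, rfl⟩)
      by_cases hx' : x = '?'
      · exact Or.inr hx'
      · rw [if_neg hx'] at this; exact Or.inl this.symm
    · intro hall y hy
      obtain ⟨x, hx, rfl⟩ := List.mem_map.1 hy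
      rcases hall x hx with h1 | h1 <;> simp [h1]
  · rw [if_neg (by rw [isIn_singleton]; exact h), List.count_eq_length]
    constructor
    · intro hall x hx; exact Or.inl (hall x hx).symm
    · intro hall x hx
      rcases hall x hx with h1 | h1
      · exact h1.symm
      · exact absurd (h1 ▸ hx) h


lemma str_half_test (s : String) (d : Char) (ds : String) (hds : ds.toList = [d]) :
    (((PySem.Str.count (if PySem.Str.isIn "?" s then PySem.Str.replace s "?" ds else s) ds : Nat) : Int)
      = PySem.Str.len (if PySem.Str.isIn "?" s then PySem.Str.replace s "?" ds else s))
    ↔ ∀ x ∈ s.toList, x = d ∨ x = '?' := by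
  have hq : ("?" : String).toList = ['?'] := by decide
  rw [← half_test d s.toList]
  by_cases h : PySem.Str.isIn "?" s = true
  · have hl : PySem.Chars.isIn ['?'] s.toList = true := by rw [← hq, ← PySem.Str.isIn_eq]; exact h
    rw [if_pos h, if_pos hl, PySem.Str.count_eq, PySem.Str.len_eq, PySem.Str.toList_replace, hq, hds,
      count_single]
    exact Nat.cast_inj
  · have hl : ¬ PySem.Chars.isIn ['?'] s.toList = true := by
      rw [← hq, ← PySem.Str.isIn_eq]; simpa using h
    rw [if_neg h, if_neg hl, PySem.Str.count_eq, PySem.Str.len_eq, hds, count_single]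
    exact Nat.cast_inj

lemma forall_take_drop {cs : List Char} {i k : Nat} (P : Char → Prop) (hk : i + k ≤ cs.length) :
    (∀ x ∈ (cs.drop i).take k, P x) ↔ ∀ t, i ≤ t → t < i + k → P (cs.getD t ' ') := by
  rw [List.forall_mem_iff_getElem]
  have hlen : ((cs.drop i).take k).length = k := by simp; omega
  have key : ∀ (u : Nat) (hu : u < ((cs.drop i).take k).length),
      ((cs.drop i).take k)[u] = cs.getD (i + u) ' ' := by
    intro u hu
    rw [List.getElem_take, List.getElem_drop,
      List.getD_eq_getElem _ _ (show i + u < cs.length by omega)]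
  constructor
  · intro h t ht1 ht2
    have hti : t - i < ((cs.drop i).take k).length := by omega
    have := h (t - i) hti
    rw [key _ hti, show i + (t - i) = t from by omega] at this
    exact this
  · intro h u hu
    rw [key _ hu]
    have hu' : u < k := by omega
    exact h (i + u) (by omega) (by omega)

-- the exact value A's inner body contributes for the pair (i, j)
lemma valA_eq (S : String) (i j : Nat) (hij : i < j) (hj : j ≤ S.toList.length) :
    valA S (i : Int) (j : Int)
      = if ((j - i) % 2 = 0
            ∧ (∀ t, i ≤ t → t < i + (j - i) / 2 → pL (S.toList.getD t ' ') = true)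
            ∧ (∀ t, i + (j - i) / 2 ≤ t → t < j → pR (S.toList.getD t ' ') = true))
        then ((j - i : Nat) : Int) else 0 := by
  have hsub : (PySem.Str.slice S (some (i : Int)) (some (j : Int))).toList
      = (S.toList.drop i).take (j - i) := by
    rw [PySem.Str.toList_slice, PySem.Chars.slice_eq_listSlice, PySem.List.slice_natCast]
  have hlen : PySem.Str.len (PySem.Str.slice S (some (i : Int)) (some (j : Int)))
      = ((j - i : Nat) : Int) := by
    rw [PySem.Str.len_eq, hsub]
    have h2 : ((S.toList.drop i).take (j - i)).length = j - i := by
      rw [List.length_take, List.length_drop]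
      omega
    rw [h2]
  set k := (j - i) / 2 with hk
  have hk2 : k ≤ j - i := Nat.div_le_self _ _
  have hdiv : PySem.Int.floordiv ((j - i : Nat) : Int) 2 = ((k : Nat) : Int) := by
    rw [hk]; exact_mod_cast PySem.Int.floordiv_natCast (j - i) 2
  have hmod : PySem.Int.mod ((j - i : Nat) : Int) 2 = (((j - i) % 2 : Nat) : Int) := by
    exact_mod_cast PySem.Int.mod_natCast (j - i) 2
  have hleft : (PySem.Str.slice (PySem.Str.slice S (some (i : Int)) (some (j : Int))) none
      (some ((k : Nat) : Int))).toList = (S.toList.drop i).take k := by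
    rw [PySem.Str.toList_slice, PySem.Chars.slice_eq_listSlice, PySem.List.slice_to_natCast, hsub,
      List.take_take, show min k (j - i) = k from by omega]
  have hright : (PySem.Str.slice (PySem.Str.slice S (some (i : Int)) (some (j : Int)))
      (some ((k : Nat) : Int)) none).toList = (S.toList.drop (i + k)).take (j - i - k) := by
    rw [PySem.Str.toList_slice, PySem.Chars.slice_eq_listSlice, PySem.List.slice_from_natCast, hsub,
      List.drop_take, List.drop_drop]
  have hCL : (((PySem.Str.count (if PySem.Str.isIn "?"
          (PySem.Str.slice (PySem.Str.slice S (some (i : Int)) (some (j : Int))) none (some ((k : Nat) : Int)))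
        then PySem.Str.replace (PySem.Str.slice (PySem.Str.slice S (some (i : Int)) (some (j : Int))) none (some ((k : Nat) : Int))) "?" "<"
        else PySem.Str.slice (PySem.Str.slice S (some (i : Int)) (some (j : Int))) none (some ((k : Nat) : Int))) "<" : Nat) : Int)
      = PySem.Str.len (if PySem.Str.isIn "?"
          (PySem.Str.slice (PySem.Str.slice S (some (i : Int)) (some (j : Int))) none (some ((k : Nat) : Int)))
        then PySem.Str.replace (PySem.Str.slice (PySem.Str.slice S (some (i : Int)) (some (j : Int))) none (some ((k : Nat) : Int))) "?" "<"
        else PySem.Str.slice (PySem.Str.slice S (some (i : Int)) (some (j : Int))) none (some ((k : Nat) : Int))))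
      ↔ (∀ t, i ≤ t → t < i + k → pL (S.toList.getD t ' ') = true) := by
    rw [str_half_test _ '<' "<" (by decide), hleft,
      forall_take_drop (fun x => x = '<' ∨ x = '?') (by omega)]
    simp only [pL, decide_eq_true_eq]
  have hCR : (((PySem.Str.count (if PySem.Str.isIn "?"
          (PySem.Str.slice (PySem.Str.slice S (some (i : Int)) (some (j : Int))) (some ((k : Nat) : Int)) none)
        then PySem.Str.replace (PySem.Str.slice (PySem.Str.slice S (some (i : Int)) (some (j : Int))) (some ((k : Nat) : Int)) none) "?" ">"
        else PySem.Str.slice (PySem.Str.slice S (some (i : Int)) (some (j : Int))) (some ((k : Nat) : Int)) none) ">" : Nat) : Int)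
      = PySem.Str.len (if PySem.Str.isIn "?"
          (PySem.Str.slice (PySem.Str.slice S (some (i : Int)) (some (j : Int))) (some ((k : Nat) : Int)) none)
        then PySem.Str.replace (PySem.Str.slice (PySem.Str.slice S (some (i : Int)) (some (j : Int))) (some ((k : Nat) : Int)) none) "?" ">"
        else PySem.Str.slice (PySem.Str.slice S (some (i : Int)) (some (j : Int))) (some ((k : Nat) : Int)) none))
      ↔ (∀ t, i + k ≤ t → t < j → pR (S.toList.getD t ' ') = true) := by
    rw [str_half_test _ '>' ">" (by decide), hright,
      forall_take_drop (fun x => x = '>' ∨ x = '?') (by omega)]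
    simp only [pR, decide_eq_true_eq]
    constructor
    · intro h t h1 h2; exact h t h1 (by omega)
    · intro h t h1 h2; exact h t h1 (by omega)
  simp only [valA]
  rw [hlen, hdiv, hmod]
  by_cases h1 : (j - i) % 2 = 0
  · rw [if_pos (by exact_mod_cast h1)]
    by_cases h2 : (∀ t, i ≤ t → t < i + k → pL (S.toList.getD t ' ') = true)
    · by_cases h3 : (∀ t, i + k ≤ t → t < j → pR (S.toList.getD t ' ') = true)
      · rw [if_pos ⟨hCL.2 h2, hCR.2 h3⟩, if_pos ⟨h1, h2, h3⟩]
      · rw [if_neg (fun hc => h3 (hCR.1 hc.2)), if_neg (fun hc => h3 hc.2.2)]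
    · rw [if_neg (fun hc => h2 (hCL.1 hc.1)), if_neg (fun hc => h2 hc.2.1)]
  · rw [if_neg (by exact_mod_cast h1), if_neg (fun hc => h1 hc.1)]

lemma A_decomp (S : String) :
    max_symmetric_substring_length S
      = bigmax ((PySem.List.pyRange 0 (PySem.Str.len S) 1).map (fun i =>
          bigmax ((PySem.List.pyRange (i + 1) (PySem.Str.len S + 1) 1).map (valA S i)))) := by
  simp only [max_symmetric_substring_length]
  have hbody : ∀ (i a : Int) (j : Int), 0 ≤ a →
      (fun (maxLen j : Int) =>
        let substring := PySem.Str.slice S (some i) (some j)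
        if PySem.Int.mod (PySem.Str.len substring) 2 = 0 then
          let leftHalf := PySem.Str.slice substring none (some (PySem.Int.floordiv (PySem.Str.len substring) 2))
          let rightHalf := PySem.Str.slice substring (some (PySem.Int.floordiv (PySem.Str.len substring) 2)) none
          let leftHalf := if PySem.Str.isIn "?" leftHalf then PySem.Str.replace leftHalf "?" "<" else leftHalf
          let rightHalf := if PySem.Str.isIn "?" rightHalf then PySem.Str.replace rightHalf "?" ">" else rightHalf
          if (PySem.Str.count leftHalf "<" : Int) = PySem.Str.len leftHalf ∧ (PySem.Str.count rightHalf ">" : Int) = PySem.Str.len rightHalf then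
            max maxLen (PySem.Str.len substring)
          else maxLen
        else maxLen) a j = max a (valA S i j) := by
    intro i a j ha
    simp only [valA]
    split_ifs <;> omega
  rw [foldl_step_max _ _
    (fun i => bigmax ((PySem.List.pyRange (i + 1) (PySem.Str.len S + 1) 1).map (valA S i)))
    (fun a i _ ha => foldl_step_max _ _ (valA S i) (fun a j _ ha => hbody i a j ha) a ha) 0 le_rfl]
  have := bigmax_nonneg ((PySem.List.pyRange 0 (PySem.Str.len S) 1).map (fun i =>
    bigmax ((PySem.List.pyRange (i + 1) (PySem.Str.len S + 1) 1).map (valA S i))))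
  omega

lemma zip_eq (cs : List Char) :
    ((0 :: runsN pL cs 0).zip (0 :: runsN pR cs.reverse 0).reverse)
      = (List.range (cs.length + 1)).map (fun m => (lbF pL cs m, rbF cs m)) := by
  apply List.ext_getElem
  · simp [List.length_zip, runsN_length]
  · intro m h1 h2
    have hm : m ≤ cs.length := by
      simp [List.length_zip, runsN_length] at h1
      omega
    rw [List.getElem_zip, List.getElem_map, List.getElem_range]
    have c1 : (0 :: runsN pL cs 0)[m]'(by simp [runsN_length]; try omega) = lbF pL cs m := by
      rw [← List.getD_eq_getElem _ 0 (by simp [runsN_length]; try omega)]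
      exact lb_eq pL cs m hm
    have c2 : ((0 :: runsN pR cs.reverse 0).reverse)[m]'(by simp [runsN_length]; try omega)
        = rbF cs m := by
      rw [List.getElem_reverse]
      have hidx : (0 :: runsN pR cs.reverse 0).length - 1 - m = cs.length - m := by
        simp [runsN_length]
      rw [← List.getD_eq_getElem _ 0 (by simp [runsN_length]; try omega)]
      have : (0 :: runsN pR cs.reverse 0).getD ((0 :: runsN pR cs.reverse 0).length - 1 - m) 0
          = (0 :: runsN pR cs.reverse 0).getD (cs.length - m) 0 := by rw [hidx]
      rw [this, lb_eq pR cs.reverse (cs.length - m) (by simp; try omega)]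
      rfl
    rw [c1, c2]

lemma B_decomp (S : String) :
    max_symmetric_substring_length_alt S
      = bigmax ((List.range (S.toList.length + 1)).map (fun m =>
          2 * min (lbF pL S.toList m) (rbF S.toList m))) := by
  simp only [max_symmetric_substring_length_alt]
  rw [foldl_runs (fun c => c = '<' ∨ c = '?') S.toList [0] 0,
    foldl_runs (fun c => c = '>' ∨ c = '?') S.toList.reverse [0] 0]
  simp only [List.singleton_append]
  rw [show (fun c => decide (c = '<' ∨ c = '?')) = pL from rfl,
    show (fun c => decide (c = '>' ∨ c = '?')) = pR from rfl,
    zip_eq S.toList,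
    foldl_step_max _ _ (fun p : Int × Int => 2 * min p.1 p.2) (fun a x _ _ => rfl) 0 le_rfl,
    List.map_map]
  simp only [Function.comp_def]
  have := bigmax_nonneg ((List.range (S.toList.length + 1)).map
    (fun m => 2 * min (lbF pL S.toList m) (rbF S.toList m)))
  omega

lemma main_eq (S : String) :
    max_symmetric_substring_length S = max_symmetric_substring_length_alt S := by
  rw [A_decomp, B_decomp, PySem.Str.len_eq]
  apply le_antisymm
  · apply bigmax_le (bigmax_nonneg _)
    intro x hx
    obtain ⟨iInt, hiMem, rfl⟩ := List.mem_map.1 hx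
    apply bigmax_le (bigmax_nonneg _)
    intro y hy
    obtain ⟨jInt, hjMem, rfl⟩ := List.mem_map.1 hy
    rw [PySem.List.mem_pyRange_iff_of_pos one_pos] at hiMem hjMem
    obtain ⟨hi0, hiN, -⟩ := hiMem
    obtain ⟨hj0, hjN, -⟩ := hjMem
    have hiI : iInt = (iInt.toNat : Int) := (Int.toNat_of_nonneg hi0).symm
    have hjI : jInt = (jInt.toNat : Int) := (Int.toNat_of_nonneg (by omega)).symm
    set i := iInt.toNat with hidef
    set j := jInt.toNat with hjdef
    have hij : i < j := by omega
    have hjn : j ≤ S.toList.length := by omega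
    rw [hiI, hjI, valA_eq S i j hij hjn]
    split_ifs with hg
    · obtain ⟨heven, hL, hR⟩ := hg
      set k := (j - i) / 2 with hkdef
      have hjk : j - i = 2 * k := by omega
      have h1 : (k : Int) ≤ lbF pL S.toList (i + k) :=
        lb_of_block pL S.toList k (i + k) (by omega)
          (fun t ht1 ht2 => hL t (by omega) (by omega))
      have h2 : (k : Int) ≤ rbF S.toList (i + k) :=
        rb_of_block S.toList k (i + k) (by omega)
          (fun t ht1 ht2 => hR t (by omega) (by omega))
      have hmem : 2 * min (lbF pL S.toList (i + k)) (rbF S.toList (i + k))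
          ∈ (List.range (S.toList.length + 1)).map (fun m =>
              2 * min (lbF pL S.toList m) (rbF S.toList m)) :=
        List.mem_map.2 ⟨i + k, List.mem_range.2 (by omega), rfl⟩
      have hle := le_bigmax hmem
      have hcast : ((j - i : Nat) : Int) = 2 * (k : Int) := by push_cast; omega
      omega
    · exact bigmax_nonneg _
  · apply bigmax_le (bigmax_nonneg _)
    intro x hx
    obtain ⟨m, hmR, rfl⟩ := List.mem_map.1 hx
    rw [List.mem_range] at hmR
    have hK0 : 0 ≤ min (lbF pL S.toList m) (rbF S.toList m) :=
      le_min (lbF_nonneg _ _ _) (rbF_nonneg _ _)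
    set k := (min (lbF pL S.toList m) (rbF S.toList m)).toNat with hkdef
    have hkK : (k : Int) = min (lbF pL S.toList m) (rbF S.toList m) := Int.toNat_of_nonneg hK0
    by_cases hk0 : k = 0
    · have hz : 2 * min (lbF pL S.toList m) (rbF S.toList m) = 0 := by omega
      rw [hz]
      exact bigmax_nonneg _
    · have h1 : (k : Int) ≤ lbF pL S.toList m := by
        have := min_le_left (lbF pL S.toList m) (rbF S.toList m); omega
      have h2 : (k : Int) ≤ rbF S.toList m := by
        have := min_le_right (lbF pL S.toList m) (rbF S.toList m); omega
      obtain ⟨hkm, hLall⟩ := lb_block pL S.toList k m h1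
      obtain ⟨hmk, hRall⟩ := rb_block S.toList k m (by omega) h2
      set i := m - k with hidef
      set j := m + k with hjdef
      have hval : valA S (i : Int) (j : Int) = ((j - i : Nat) : Int) := by
        rw [valA_eq S i j (by omega) (by omega), if_pos]
        refine ⟨by omega, ?_, ?_⟩
        · intro t ht1 ht2
          exact hLall t (by omega) (by omega)
        · intro t ht1 ht2
          exact hRall t (by omega) (by omega)
      have hjMem : ((j : Nat) : Int) ∈ PySem.List.pyRange ((i : Nat) + 1 : Int) ((S.toList.length : Int) + 1) 1 :=
        (PySem.List.mem_pyRange_iff_of_pos one_pos _).2 ⟨by push_cast; omega, by push_cast; omega, one_dvd _⟩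
      have hiMem : ((i : Nat) : Int) ∈ PySem.List.pyRange 0 (S.toList.length : Int) 1 :=
        (PySem.List.mem_pyRange_iff_of_pos one_pos _).2 ⟨by positivity, by push_cast; omega, one_dvd _⟩
      have step1 : valA S (i : Int) (j : Int)
          ≤ bigmax ((PySem.List.pyRange ((i : Nat) + 1 : Int) ((S.toList.length : Int) + 1) 1).map (valA S (i : Int))) :=
        le_bigmax (List.mem_map.2 ⟨((j : Nat) : Int), hjMem, rfl⟩)
      have step2 : bigmax ((PySem.List.pyRange ((i : Nat) + 1 : Int) ((S.toList.length : Int) + 1) 1).map (valA S (i : Int)))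
          ≤ bigmax ((PySem.List.pyRange 0 (S.toList.length : Int) 1).map (fun iI =>
              bigmax ((PySem.List.pyRange (iI + 1) ((S.toList.length : Int) + 1) 1).map (valA S iI)))) :=
        le_bigmax (List.mem_map.2 ⟨((i : Nat) : Int), hiMem, rfl⟩)
      have hcast : ((j - i : Nat) : Int) = 2 * (k : Int) := by push_cast; omega
      omega

-- ===== VERDICT (by name: the statement is the Claim_ definition above) =====
theorem max_symmetric_substring_length_spec : Claim_equal_max_symmetric_substring_length := by
  intro S _
  unfold Spec_max_symmetric_substring_length
  exact main_eq S
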